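-- pv_equiv track=rewrite | github.com/SamSamsung/project-epidemy | mise_a_jour.py | statistiques
-- ===== SOURCE A (Python) =====
-- def statistiques(G, saine=0, contaminee=0, immunisee=0, decedee=0):
--     """
--     Entrée:
--     La grille et les variables qui consitituent les états de toutes les cellules.
--     Sortie:
--     Un dictionnaire contenant toutes les statistiques de la grille
--     """
--     for i in range(len(G)):
--         for j in range(len(G[i])):
--             if G[i][j]["etat"] == "saine":
--                 saine += 1  # Si la cellule est saine, on rajoute 1 aux statistiques des cellules saines
--             elif G[i][j]["etat"] == "contaminee":
--                 contaminee += 1  # Si la cellule est contaminée, on rajoute 1 aux statistiques des cellules contaminées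
--             elif G[i][j]["etat"] == "immunisee":
--                 immunisee += 1  # Si la cellule est immunisée, on rajoute 1 aux statistiques des cellules immunisées
--             elif G[i][j]["etat"] == "decedee":
--                 decedee += 1  # Si la cellule est décédée, on rajoute 1 aux statistiques des cellules décédées
--     return {"saine": saine, "contaminee": contaminee, "immunisee": immunisee, "decedee": decedee}
-- ===== SOURCE B (Python) =====
-- def statistiques(G, saine=0, contaminee=0, immunisee=0, decedee=0):
--     etats = [cell["etat"] for row in G for cell in row]
--     return {"saine": saine + etats.count("saine"),
--             "contaminee": contaminee + etats.count("contaminee"),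
--             "immunisee": immunisee + etats.count("immunisee"),
--             "decedee": decedee + etats.count("decedee")}
-- ===== Notes on version B (the rewrite author's own statement) =====
-- stated objective: alternative
-- what changed: Replaces the four-scalar accumulator with per-cell if/elif branching by flattening all 'etat' values once and counting each of the four known states with list.count, adding the starting offsets at the end.
import Mathlib
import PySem

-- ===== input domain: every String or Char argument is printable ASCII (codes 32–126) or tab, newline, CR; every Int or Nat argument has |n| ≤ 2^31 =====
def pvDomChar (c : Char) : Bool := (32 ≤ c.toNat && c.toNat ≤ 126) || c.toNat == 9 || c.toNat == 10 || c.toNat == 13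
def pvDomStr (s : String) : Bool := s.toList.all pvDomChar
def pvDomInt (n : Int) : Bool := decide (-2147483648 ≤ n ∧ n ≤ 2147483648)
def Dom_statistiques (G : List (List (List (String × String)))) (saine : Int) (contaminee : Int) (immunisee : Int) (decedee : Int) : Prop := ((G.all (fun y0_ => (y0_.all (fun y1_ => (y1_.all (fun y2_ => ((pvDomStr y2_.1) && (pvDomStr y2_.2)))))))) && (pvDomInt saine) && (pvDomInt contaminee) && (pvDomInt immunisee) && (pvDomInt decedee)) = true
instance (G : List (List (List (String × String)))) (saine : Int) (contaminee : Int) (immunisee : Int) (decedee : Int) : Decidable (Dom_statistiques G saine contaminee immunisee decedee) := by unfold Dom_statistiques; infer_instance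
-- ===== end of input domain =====

-- B replaces A's per-cell if/elif updates of four scalars by flattening the 'etat' values once
-- and counting each known state with list.count (alternative decomposition, same cost).

-- shared helper: the Python dict lookup cell["etat"] (total form; Pre_ guarantees the key is present)
def etatOf (cell : List (String × String)) : String := (PySem.Dict.mk cell).getD "etat" ""

-- ===== PORT A =====
def statistiques (G : List (List (List (String × String)))) (saine : Int) (contaminee : Int) (immunisee : Int) (decedee : Int) : List (String × Int) :=
  let st := G.foldl (fun (s : Int × Int × Int × Int) row =>
    row.foldl (fun (s : Int × Int × Int × Int) cell =>
      let e := etatOf cell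
      if e = "saine" then (s.1 + 1, s.2.1, s.2.2.1, s.2.2.2)
      else if e = "contaminee" then (s.1, s.2.1 + 1, s.2.2.1, s.2.2.2)
      else if e = "immunisee" then (s.1, s.2.1, s.2.2.1 + 1, s.2.2.2)
      else if e = "decedee" then (s.1, s.2.1, s.2.2.1, s.2.2.2 + 1)
      else s) s) (saine, contaminee, immunisee, decedee)
  [("saine", st.1), ("contaminee", st.2.1), ("immunisee", st.2.2.1), ("decedee", st.2.2.2)]

-- ===== PORT B =====
def statistiques_alt (G : List (List (List (String × String)))) (saine : Int) (contaminee : Int) (immunisee : Int) (decedee : Int) : List (String × Int) :=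
  let etats := G.flatMap (fun row => row.map etatOf)
  [("saine", saine + (PySem.List.count etats "saine" : Int)),
   ("contaminee", contaminee + (PySem.List.count etats "contaminee" : Int)),
   ("immunisee", immunisee + (PySem.List.count etats "immunisee" : Int)),
   ("decedee", decedee + (PySem.List.count etats "decedee" : Int))]

-- ===== PRECONDITION & SPEC =====
-- Pre_ excludes exactly the inputs where some cell lacks the key "etat", on which A raises KeyError.
def Pre_statistiques (G : List (List (List (String × String)))) (saine : Int) (contaminee : Int) (immunisee : Int) (decedee : Int) : Prop :=
  (G.all (fun row => row.all (fun cell => (PySem.Dict.mk cell).contains "etat"))) = true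
instance (G : List (List (List (String × String)))) (saine : Int) (contaminee : Int) (immunisee : Int) (decedee : Int) : Decidable (Pre_statistiques G saine contaminee immunisee decedee) := by unfold Pre_statistiques; infer_instance

def pvWitness_statistiques : (List (List (List (String × String)))) × Int × Int × Int × Int :=
  ([[[("etat", "saine")], [("etat", "contaminee")]], [[("etat", "morte")]]], 0, 1, 2, 3)

def Spec_statistiques (G : List (List (List (String × String)))) (saine : Int) (contaminee : Int) (immunisee : Int) (decedee : Int) (out : List (String × Int)) : Prop := out = statistiques_alt G saine contaminee immunisee decedee
instance (G : List (List (List (String × String)))) (saine : Int) (contaminee : Int) (immunisee : Int) (decedee : Int) (out : List (String × Int)) : Decidable (Spec_statistiques G saine contaminee immunisee decedee out) := by unfold Spec_statistiques; infer_instance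

-- ===== CLAIM (what is proved, stated in full; the proofs are below) =====
def Claim_equal_statistiques : Prop := ∀ (G : List (List (List (String × String)))) (saine : Int) (contaminee : Int) (immunisee : Int) (decedee : Int), Dom_statistiques G saine contaminee immunisee decedee → Pre_statistiques G saine contaminee immunisee decedee → Spec_statistiques G saine contaminee immunisee decedee (statistiques G saine contaminee immunisee decedee)

-- ===== LEMMAS AND PROOFS =====

-- A's inner loop over one row, characterised by counts of the row's etat values
theorem inner_loop_eq (row : List (List (String × String))) (a b c d : Int) :
    row.foldl (fun (s : Int × Int × Int × Int) cell =>
      let e := etatOf cell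
      if e = "saine" then (s.1 + 1, s.2.1, s.2.2.1, s.2.2.2)
      else if e = "contaminee" then (s.1, s.2.1 + 1, s.2.2.1, s.2.2.2)
      else if e = "immunisee" then (s.1, s.2.1, s.2.2.1 + 1, s.2.2.2)
      else if e = "decedee" then (s.1, s.2.1, s.2.2.1, s.2.2.2 + 1)
      else s) (a, b, c, d)
    = (a + ((row.map etatOf).count "saine" : Int),
       b + ((row.map etatOf).count "contaminee" : Int),
       c + ((row.map etatOf).count "immunisee" : Int),
       d + ((row.map etatOf).count "decedee" : Int)) := by
  induction row generalizing a b c d with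
  | nil => simp
  | cons x xs ih =>
      simp only [List.foldl_cons, List.map_cons]
      split_ifs with h1 h2 h3 h4 <;> rw [ih] <;>
        simp [List.count_cons, h1, *] <;> push_cast <;> ring

-- A's outer loop over the grid, same characterisation over the flattened etat list
theorem outer_loop_eq (G : List (List (List (String × String)))) (a b c d : Int) :
    G.foldl (fun (s : Int × Int × Int × Int) row =>
      row.foldl (fun (s : Int × Int × Int × Int) cell =>
        let e := etatOf cell
        if e = "saine" then (s.1 + 1, s.2.1, s.2.2.1, s.2.2.2)
        else if e = "contaminee" then (s.1, s.2.1 + 1, s.2.2.1, s.2.2.2)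
        else if e = "immunisee" then (s.1, s.2.1, s.2.2.1 + 1, s.2.2.2)
        else if e = "decedee" then (s.1, s.2.1, s.2.2.1, s.2.2.2 + 1)
        else s) s) (a, b, c, d)
    = (a + (((G.flatMap (fun row => row.map etatOf))).count "saine" : Int),
       b + (((G.flatMap (fun row => row.map etatOf))).count "contaminee" : Int),
       c + (((G.flatMap (fun row => row.map etatOf))).count "immunisee" : Int),
       d + (((G.flatMap (fun row => row.map etatOf))).count "decedee" : Int)) := by
  induction G generalizing a b c d with
  | nil => simp
  | cons r rs ih =>
      simp only [List.foldl_cons, List.flatMap_cons, List.count_append]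
      rw [inner_loop_eq, ih]
      push_cast; ring_nf

-- ===== VERDICT (by name: the statement is the Claim_ definition above) =====
theorem statistiques_spec : Claim_equal_statistiques := by
  intro G saine contaminee immunisee decedee _ _
  show _ = _
  simp only [statistiques, statistiques_alt, outer_loop_eq, PySem.List.count_eq]
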